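-- pv_equiv track=rewrite | github.com/seanchen513/dcp | linked_list/dcp305_remove_zero_sum_consec_nodes_from_LL.py | remove_from_arr
-- ===== SOURCE A (Python) =====
-- def remove_from_arr(arr):
--     n = len(arr)
--
--     for start in range(n):
--         sum = 0
--
--         for end in range(start, n):
--             sum += arr[end]
--
--             if sum == 0: # then remove indices from start to end
--                 del arr[start:end+1]
--                 return remove_from_arr(arr)
--
--     return arr
-- ===== SOURCE B (Python) =====
-- # One-line intent: same result as A (repeatedly delete the first zero-sum run, leftmost
-- # start then shortest run) but each search is done in O(n) with prefix sums and a
-- # last-occurrence hashmap instead of A's quadratic nested re-summation.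
-- # Like A, mutates arr in place via del; the equivalence claimed is about the return value.
-- def remove_from_arr(arr):
--     while True:
--         n = len(arr)
--         prefix = [0] * (n + 1)
--         for k in range(n):
--             prefix[k + 1] = prefix[k] + arr[k]
--         last = {}
--         for k in range(n + 1):
--             last[prefix[k]] = k
--         start = None
--         for i in range(n + 1):
--             if last[prefix[i]] > i:
--                 start = i
--                 break
--         if start is None:
--             return arr
--         j = start + 1
--         while prefix[j] != prefix[start]:
--             j += 1
--         del arr[start:j]
-- ===== Notes on version B (the rewrite author's own statement) =====
-- stated objective: faster
-- what changed: Each removal step finds the leftmost (then shortest) zero-sum run via prefix sums and a last-occurrence hashmap in O(n), instead of A's nested start/end loops that re-sum every subarray; the removed segment is identical at every step, so the result is identical.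
import Mathlib
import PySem

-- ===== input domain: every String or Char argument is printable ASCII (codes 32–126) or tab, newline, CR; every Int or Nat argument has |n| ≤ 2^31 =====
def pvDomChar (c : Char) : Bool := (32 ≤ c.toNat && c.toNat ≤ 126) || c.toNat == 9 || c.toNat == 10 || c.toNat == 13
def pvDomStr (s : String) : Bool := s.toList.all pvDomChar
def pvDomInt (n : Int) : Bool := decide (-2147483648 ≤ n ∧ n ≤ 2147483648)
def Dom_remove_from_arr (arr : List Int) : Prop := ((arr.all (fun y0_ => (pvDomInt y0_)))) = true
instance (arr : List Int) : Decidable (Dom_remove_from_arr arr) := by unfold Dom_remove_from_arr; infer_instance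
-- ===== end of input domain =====

-- B replaces A's nested re-summing search for the first zero-sum run by a prefix-sum /
-- last-occurrence-hashmap search (O(n) per removal step instead of O(n^2)): objective = faster.
-- Both Pythons mutate arr in place (del); the equivalence proved is about the return value.

-- ===== PORT A =====
-- inner loop: 'sum = 0; for end in range(start, n): sum += arr[end]; if sum == 0: …'
-- returns the first index `end` (absolute, starting at j) where the running sum hits 0
def aInner : Int → Nat → List Int → Option Nat
  | _, _, [] => none
  | s, j, x :: xs => if s + x = 0 then some j else aInner (s + x) (j + 1) xs

-- outer loop: 'for start in range(n): …'; first (start, end) hit, in A's order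
def aScan : Nat → List Int → Option (Nat × Nat)
  | _, [] => none
  | s, x :: xs =>
    match aInner 0 s (x :: xs) with
    | some e => some (s, e)
    | none => aScan (s + 1) xs

-- termination bound for the recursion 'return remove_from_arr(arr)' after 'del'
theorem aInner_bound : ∀ (l : List Int) (c : Int) (j e : Nat),
    aInner c j l = some e → j ≤ e ∧ e < j + l.length := by
  intro l
  induction l with
  | nil => intro c j e h; simp [aInner] at h
  | cons x xs ih =>
    intro c j e h
    simp only [aInner] at h
    split at h
    · cases h; simp only [List.length_cons]; omega
    · have := ih (c + x) (j + 1) e h; simp only [List.length_cons]; omega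

theorem aScan_bound : ∀ (l : List Int) (s s' e : Nat),
    aScan s l = some (s', e) → s ≤ s' ∧ s' ≤ e ∧ e < s + l.length := by
  intro l
  induction l with
  | nil => intro s s' e h; simp [aScan] at h
  | cons x xs ih =>
    intro s s' e h
    simp only [aScan] at h
    split at h
    · rename_i e' he
      simp only [Option.some.injEq, Prod.mk.injEq] at h
      obtain ⟨h1, h2⟩ := h
      have := aInner_bound (x :: xs) 0 s e' he
      simp only [List.length_cons] at this ⊢
      omega
    · have := ih (s + 1) s' e h; simp only [List.length_cons]; omega

-- 'del arr[start:end+1]; return remove_from_arr(arr)' — the slice delete is exact as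
-- take start ++ drop (end+1) since 0 ≤ start ≤ end+1 here
def remove_from_arr (arr : List Int) : List Int :=
  match h : aScan 0 arr with
  | none => arr
  | some (s, e) => remove_from_arr (arr.take s ++ arr.drop (e + 1))
termination_by arr.length
decreasing_by
  have hb := aScan_bound arr 0 s e h
  simp only [List.length_append, List.length_take, List.length_drop]
  omega

-- ===== PORT B =====
-- 'prefix[k+1] = prefix[k] + arr[k]' filling loop, as structural recursion on arr
def bPrefix : Int → List Int → List Int
  | p, [] => [p]
  | p, x :: xs => p :: bPrefix (p + x) xs

-- 'for k in range(n+1): last[prefix[k]] = k' — last-occurrence dict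
def bLast : PySem.Dict Int Nat → Nat → List Int → PySem.Dict Int Nat
  | d, _, [] => d
  | d, k, p :: ps => bLast (d.insert p k) (k + 1) ps

-- 'for i in range(n+1): if last[prefix[i]] > i: start = i; break'
-- (the key prefix[i] is always present in last, so getD's default is never read)
def bStart (d : PySem.Dict Int Nat) : Nat → List Int → Option (Nat × Int)
  | _, [] => none
  | i, p :: ps => if i < d.getD p 0 then some (i, p) else bStart d (i + 1) ps

-- 'j = start + 1; while prefix[j] != prefix[start]: j += 1' (a matching j always exists)
def bJ (t : Int) : Nat → List Int → Option Nat
  | _, [] => none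
  | j, p :: ps => if p = t then some j else bJ t (j + 1) ps

-- one search pass of B: the segment [i, j) to delete, if any
def bFind (arr : List Int) : Option (Nat × Nat) :=
  match bStart (bLast PySem.Dict.empty 0 (bPrefix 0 arr)) 0 (bPrefix 0 arr) with
  | none => none
  | some (i, t) =>
    match bJ t (i + 1) ((bPrefix 0 arr).drop (i + 1)) with
    | some j => some (i, j)
    | none => none

theorem bPrefix_length : ∀ (l : List Int) (p : Int), (bPrefix p l).length = l.length + 1 := by
  intro l
  induction l with
  | nil => intro p; simp [bPrefix]
  | cons x xs ih => intro p; simp [bPrefix, ih]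

theorem bStart_bound : ∀ (l : List Int) (d : PySem.Dict Int Nat) (i i' : Nat) (t : Int),
    bStart d i l = some (i', t) → i ≤ i' ∧ i' < i + l.length := by
  intro l
  induction l with
  | nil => intro d i i' t h; simp [bStart] at h
  | cons p ps ih =>
    intro d i i' t h
    simp only [bStart] at h
    split at h
    · cases h; simp only [List.length_cons]; omega
    · have := ih d (i + 1) i' t h; simp only [List.length_cons]; omega

theorem bJ_bound : ∀ (l : List Int) (t : Int) (j j' : Nat),
    bJ t j l = some j' → j ≤ j' ∧ j' < j + l.length := by
  intro l
  induction l with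
  | nil => intro t j j' h; simp [bJ] at h
  | cons p ps ih =>
    intro t j j' h
    simp only [bJ] at h
    split at h
    · cases h; simp only [List.length_cons]; omega
    · have := ih t (j + 1) j' h; simp only [List.length_cons]; omega

theorem bFind_bound (arr : List Int) (i j : Nat) (h : bFind arr = some (i, j)) :
    i < j ∧ j ≤ arr.length := by
  unfold bFind at h
  split at h
  · exact absurd h (by simp)
  · rename_i i' t hs
    split at h
    · rename_i j' hj
      cases h
      have h1 := bStart_bound _ _ _ _ _ hs
      have h2 := bJ_bound _ _ _ _ hj
      have h3 := bPrefix_length arr 0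
      have h4 : ((bPrefix 0 arr).drop (i + 1)).length = (bPrefix 0 arr).length - (i + 1) :=
        List.length_drop
      omega
    · exact absurd h (by simp)

-- 'while True: … del arr[start:j]' — the loop body repeats on the shortened list
def remove_from_arr_alt (arr : List Int) : List Int :=
  match h : bFind arr with
  | none => arr
  | some (i, j) => remove_from_arr_alt (arr.take i ++ arr.drop j)
termination_by arr.length
decreasing_by
  have hb := bFind_bound arr i j h
  simp only [List.length_append, List.length_take, List.length_drop]
  omega

-- ===== PRECONDITION & SPEC =====
def Spec_remove_from_arr (arr : List Int) (out : List Int) : Prop := out = remove_from_arr_alt arr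
instance (arr : List Int) (out : List Int) : Decidable (Spec_remove_from_arr arr out) := by unfold Spec_remove_from_arr; infer_instance

-- ===== CLAIM (what is proved, stated in full; the proofs are below) =====
def Claim_equal_remove_from_arr : Prop := ∀ (arr : List Int), Dom_remove_from_arr arr → Spec_remove_from_arr arr (remove_from_arr arr)

-- ===== LEMMAS AND PROOFS =====

-- B's prefix list shifted by a constant
theorem bPrefix_shift : ∀ (l : List Int) (a b : Int),
    bPrefix (a + b) l = (bPrefix b l).map (fun q => a + q) := by
  intro l
  induction l with
  | nil => intro a b; simp [bPrefix]
  | cons x xs ih =>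
    intro a b
    simp only [bPrefix, List.map_cons]
    have hab : a + b + x = a + (b + x) := by ring
    rw [hab, ih a (b + x)]

-- dropping s elements of the prefix list = prefix list of the dropped array, shifted
theorem bPrefix_drop : ∀ (l : List Int) (s : Nat) (c : Int), s ≤ l.length →
    (bPrefix c l).drop s = bPrefix (c + (l.take s).sum) (l.drop s) := by
  intro l
  induction l with
  | nil =>
    intro s c hs
    have hs0 : s = 0 := Nat.le_zero.mp (by simpa using hs)
    subst hs0
    simp [bPrefix]
  | cons x xs ih =>
    intro s c hs
    cases s with
    | zero => simp [bPrefix]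
    | succ s =>
      simp only [bPrefix, List.drop_succ_cons, List.take_succ_cons, List.sum_cons,
        List.drop_succ_cons]
      rw [ih s (c + x) (by simpa using hs)]
      ring_nf

-- every bPrefix is its head consed on its tail
theorem bPrefix_head_tail : ∀ (p : Int) (l : List Int),
    bPrefix p l = p :: (bPrefix p l).tail := by
  intro p l
  cases l <;> rfl

-- A's running-sum inner loop is B's j-search for target 0 on the tail of the prefix list
theorem aInner_bJ : ∀ (l : List Int) (c : Int) (j : Nat),
    aInner c j l = (bJ 0 (j + 1) ((bPrefix c l).tail)).map (fun e => e - 1) := by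
  intro l
  induction l with
  | nil => intro c j; simp [aInner, bPrefix, bJ]
  | cons x xs ih =>
    intro c j
    simp only [aInner, bPrefix, List.tail_cons]
    rw [bPrefix_head_tail (c + x) xs]
    simp only [bJ]
    by_cases h0 : c + x = 0
    · rw [if_pos h0, if_pos h0]
      simp
    · rw [if_neg h0, if_neg h0]
      rw [ih (c + x) (j + 1)]

-- the searched value can be normalised out of bJ
theorem bJ_shift : ∀ (l : List Int) (t : Int) (j : Nat),
    bJ t j (l.map (fun q => t + q)) = bJ 0 j l := by
  intro l
  induction l with
  | nil => intro t j; simp [bJ]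
  | cons q qs ih =>
    intro t j
    simp only [List.map_cons, bJ]
    by_cases hq : q = 0
    · rw [if_pos (by omega), if_pos hq]
    · rw [if_neg (by omega), if_neg hq]
      exact ih t (j + 1)

theorem bJ_eq_none : ∀ (l : List Int) (t : Int) (j : Nat), t ∉ l → bJ t j l = none := by
  intro l
  induction l with
  | nil => intro t j _; rfl
  | cons p ps ih =>
    intro t j h
    simp only [List.mem_cons, not_or] at h
    simp only [bJ]
    rw [if_neg (by exact fun hc => h.1 hc.symm)]
    exact ih t (j + 1) h.2

theorem bJ_some_of_mem : ∀ (l : List Int) (t : Int) (j : Nat), t ∈ l →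
    ∃ j', bJ t j l = some j' := by
  intro l
  induction l with
  | nil => intro t j h; simp at h
  | cons p ps ih =>
    intro t j h
    simp only [bJ]
    by_cases hp : p = t
    · exact ⟨j, by rw [if_pos hp]⟩
    · rw [if_neg hp]
      have : t ∈ ps := by
        rcases List.mem_cons.mp h with h1 | h1
        · exact absurd h1.symm hp
        · exact h1
      exact ih t (j + 1) this

-- keys not in ps are untouched by the last-occurrence loop
theorem bLast_pres : ∀ (ps : List Int) (d : PySem.Dict Int Nat) (k : Nat) (q : Int),
    q ∉ ps → (bLast d k ps).get? q = d.get? q := by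
  intro ps
  induction ps with
  | nil => intro d k q _; rfl
  | cons p ps ih =>
    intro d k q h
    simp only [List.mem_cons, not_or] at h
    simp only [bLast]
    rw [ih (d.insert p k) (k + 1) q h.2]
    exact PySem.Dict.get?_insert_of_ne _ _ h.1

-- the recorded index is ≥ every occurrence (it is the LAST occurrence)
theorem bLast_ge : ∀ (ps : List Int) (d : PySem.Dict Int Nat) (k j : Nat)
    (hj : j < ps.length), k + j ≤ (bLast d k ps).getD ps[j] 0 := by
  intro ps
  induction ps with
  | nil => intro d k j hj; simp at hj
  | cons p ps ih =>
    intro d k j hj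
    cases j with
    | zero =>
      simp only [List.getElem_cons_zero, bLast, Nat.add_zero]
      by_cases hp : p ∈ ps
      · obtain ⟨j', hj', he⟩ := List.getElem_of_mem hp
        have := ih (d.insert p k) (k + 1) j' hj'
        rw [he] at this
        omega
      · rw [PySem.Dict.getD_eq_get?_getD, bLast_pres ps _ _ p hp,
          ← PySem.Dict.getD_eq_get?_getD, PySem.Dict.getD_insert_self]
    | succ j =>
      simp only [List.getElem_cons_succ, bLast]
      have := ih (d.insert p k) (k + 1) j (by simpa using Nat.lt_of_succ_lt_succ hj)
      omega

-- any recorded index really is an occurrence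
theorem bLast_le : ∀ (ps : List Int) (d : PySem.Dict Int Nat) (k : Nat) (q : Int) (v : Nat),
    (bLast d k ps).get? q = some v →
    d.get? q = some v ∨ (k ≤ v ∧ v < k + ps.length ∧ ps[v - k]? = some q) := by
  intro ps
  induction ps with
  | nil => intro d k q v h; exact Or.inl h
  | cons p ps ih =>
    intro d k q v h
    simp only [bLast] at h
    rcases ih (d.insert p k) (k + 1) q v h with h1 | ⟨h1, h2, h3⟩
    · by_cases hq : q = p
      · subst hq
        rw [PySem.Dict.get?_insert_self] at h1
        have hv : v = k := by injection h1; omega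
        subst hv
        refine Or.inr ⟨le_refl _, by simp only [List.length_cons]; omega, ?_⟩
        simp
      · rw [PySem.Dict.get?_insert_of_ne _ _ hq] at h1
        exact Or.inl h1
    · refine Or.inr ⟨by omega, by simp only [List.length_cons]; omega, ?_⟩
      have hvk : v - k = (v - (k + 1)) + 1 := by omega
      rw [hvk, List.getElem?_cons_succ]
      exact h3

-- the dict test 'last[prefix[i]] > i' is exactly 'prefix[i] occurs again later'
theorem lastocc_iff (P : List Int) (q : Int) (s : Nat) (hq : P[s]? = some q) :
    s < (bLast PySem.Dict.empty 0 P).getD q 0 ↔ q ∈ P.drop (s + 1) := by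
  constructor
  · intro h
    rcases hget : (bLast PySem.Dict.empty 0 P).get? q with _ | v
    · rw [PySem.Dict.getD_eq_get?_getD, hget] at h
      simp at h
    · rcases bLast_le P PySem.Dict.empty 0 q v hget with h1 | ⟨_, h2, h3⟩
      · rw [PySem.Dict.get?_empty] at h1
        exact absurd h1 (by simp)
      · rw [PySem.Dict.getD_eq_get?_getD, hget] at h
        simp only [Option.getD_some] at h
        simp only [Nat.sub_zero, Nat.zero_add] at h2 h3
        have hmem : (P.drop (s + 1))[v - (s + 1)]? = some q := by
          rw [List.getElem?_drop]
          have : s + 1 + (v - (s + 1)) = v := by omega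
          rw [this]
          exact h3
        exact List.mem_of_getElem? hmem
  · intro hmem
    obtain ⟨idx, hidx, he⟩ := List.getElem_of_mem hmem
    have hslen : s < P.length := by
      have := List.getElem?_eq_some_iff.mp hq
      exact this.1
    have hlt : s + 1 + idx < P.length := by
      rw [List.length_drop] at hidx
      omega
    have hPe : P[s + 1 + idx]'hlt = q := by
      rw [← he]
      rw [List.getElem_drop]
    have := bLast_ge P PySem.Dict.empty 0 (s + 1 + idx) hlt
    rw [hPe] at this
    omega

-- A's running-sum inner loop over the suffix, in absolute prefix terms
theorem aInner_abs (arr : List Int) (s : Nat) (hs : s ≤ arr.length) :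
    aInner 0 s (arr.drop s) =
      (bJ ((arr.take s).sum) (s + 1) ((bPrefix 0 arr).drop (s + 1))).map (fun e => e - 1) := by
  have hdrop : (bPrefix 0 arr).drop s = bPrefix ((arr.take s).sum) (arr.drop s) := by
    have := bPrefix_drop arr s 0 hs
    simpa using this
  have htail : (bPrefix 0 arr).drop (s + 1) = ((bPrefix ((arr.take s).sum) (arr.drop s))).tail := by
    rw [← hdrop, List.tail_drop]
  rw [htail]
  have hshift : bPrefix ((arr.take s).sum) (arr.drop s) =
      (bPrefix 0 (arr.drop s)).map (fun q => (arr.take s).sum + q) := by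
    have := bPrefix_shift (arr.drop s) ((arr.take s).sum) 0
    simpa using this
  rw [hshift, ← List.map_tail, bJ_shift]
  exact aInner_bJ (arr.drop s) 0 s

-- lockstep equality of the two outer searches, from position s on
theorem outer (arr : List Int) : ∀ (m s : Nat), arr.length + 1 - s = m → s ≤ arr.length →
    aScan s (arr.drop s) =
      (match bStart (bLast PySem.Dict.empty 0 (bPrefix 0 arr)) s ((bPrefix 0 arr).drop s) with
       | none => none
       | some (i, t) =>
         (bJ t (i + 1) ((bPrefix 0 arr).drop (i + 1))).map (fun j => (i, j - 1))) := by
  intro m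
  induction m with
  | zero => intro s h hs; omega
  | succ m ih =>
    intro s h hs
    have hdrop : (bPrefix 0 arr).drop s = bPrefix ((arr.take s).sum) (arr.drop s) := by
      have := bPrefix_drop arr s 0 hs
      simpa using this
    have htail : ((bPrefix 0 arr).drop s).tail = (bPrefix 0 arr).drop (s + 1) :=
      List.tail_drop
    have hcons : (bPrefix 0 arr).drop s = (arr.take s).sum :: (bPrefix 0 arr).drop (s + 1) := by
      rw [← htail]
      conv_lhs => rw [hdrop, bPrefix_head_tail]
      rw [hdrop]
    have hq : (bPrefix 0 arr)[s]? = some ((arr.take s).sum) := by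
      have h0 : ((bPrefix 0 arr).drop s)[0]? = some ((arr.take s).sum) := by
        rw [hcons]; rfl
      rw [List.getElem?_drop] at h0
      simpa using h0
    have hiff := lastocc_iff (bPrefix 0 arr) ((arr.take s).sum) s hq
    rw [hcons]
    simp only [bStart]
    by_cases hckey : s < (bLast PySem.Dict.empty 0 (bPrefix 0 arr)).getD ((arr.take s).sum) 0
    · rw [if_pos hckey]
      have hmem := hiff.mp hckey
      obtain ⟨j', hj'⟩ := bJ_some_of_mem _ _ (s + 1) hmem
      cases harr : arr.drop s with
      | nil =>
        exfalso
        have hlen : arr.length ≤ s := List.drop_eq_nil_iff.mp harr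
        have : (bPrefix 0 arr).drop (s + 1) = [] := by
          apply List.drop_eq_nil_of_le
          rw [bPrefix_length]
          omega
        rw [this] at hmem
        simp at hmem
      | cons x xs =>
        simp only [aScan]
        rw [← harr, aInner_abs arr s hs, hj']
        simp
    · rw [if_neg hckey]
      have hnmem := (not_congr hiff).mp hckey
      have hnone : aInner 0 s (arr.drop s) = none := by
        rw [aInner_abs arr s hs, bJ_eq_none _ _ _ hnmem]
        rfl
      cases harr : arr.drop s with
      | nil =>
        have hlen : arr.length ≤ s := List.drop_eq_nil_iff.mp harr
        have hnil : (bPrefix 0 arr).drop (s + 1) = [] := by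
          apply List.drop_eq_nil_of_le
          rw [bPrefix_length]
          omega
        rw [hnil]
        simp [aScan, bStart]
      | cons x xs =>
        have hslt : s < arr.length := by
          by_contra hge
          rw [List.drop_eq_nil_of_le (by omega)] at harr
          simp at harr
        have hxs : xs = arr.drop (s + 1) := by
          rw [← List.tail_drop, harr]
          rfl
        simp only [aScan]
        rw [← harr, hnone, hxs]
        exact ih (s + 1) (by omega) (by omega)

-- the two search passes agree (B's right end j corresponds to A's end = j - 1)
theorem find_eq (arr : List Int) :
    aScan 0 arr = (bFind arr).map (fun p => (p.1, p.2 - 1)) := by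
  have h := outer arr (arr.length + 1) 0 (by omega) (by omega)
  simp only [List.drop_zero] at h
  rw [h]
  unfold bFind
  cases hbs : bStart (bLast PySem.Dict.empty 0 (bPrefix 0 arr)) 0 (bPrefix 0 arr) with
  | none => rfl
  | some it =>
    obtain ⟨i, t⟩ := it
    cases hbj : bJ t (i + 1) ((bPrefix 0 arr).drop (i + 1)) with
    | none => simp [hbj]
    | some j => simp [hbj]

theorem main_eq : ∀ (arr : List Int), remove_from_arr arr = remove_from_arr_alt arr := by
  have key : ∀ (n : Nat) (arr : List Int), arr.length ≤ n →
      remove_from_arr arr = remove_from_arr_alt arr := by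
    intro n
    induction n using Nat.strong_induction_on with
    | _ n ihn =>
      intro arr hlen
      have hf := find_eq arr
      rw [remove_from_arr, remove_from_arr_alt]
      split
      · rename_i hA
        split
        · rfl
        · rename_i i j hB
          rw [hA, hB] at hf
          simp at hf
      · rename_i s e hA
        split
        · rename_i hB
          rw [hA, hB] at hf
          simp at hf
        · rename_i i j hB
          rw [hA, hB] at hf
          simp only [Option.map_some, Option.some.injEq, Prod.mk.injEq] at hf
          obtain ⟨hsi, hej⟩ := hf
          have hb := bFind_bound arr i j hB
          subst hsi
          have he1 : e + 1 = j := by omega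
          rw [he1]
          have hlt : (arr.take s ++ arr.drop j).length < arr.length := by
            simp only [List.length_append, List.length_take, List.length_drop]
            omega
          cases n with
          | zero => omega
          | succ n' => exact ihn n' (by omega) _ (by omega)
  intro arr
  exact key arr.length arr (le_refl _)

-- ===== VERDICT (by name: the statement is the Claim_ definition above) =====
theorem remove_from_arr_spec : Claim_equal_remove_from_arr := by
  intro arr _
  unfold Spec_remove_from_arr
  exact main_eq arr
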